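-- pv_equiv track=rewrite | github.com/alxwen711/contestSubmissionArchive | advent/2023/part 5/21-3.py | supergen
-- ===== SOURCE A (Python) =====
-- def supergen(ar,x):
--     br = list()
--     n = len(ar)
--     for i in range(n*x):
--         row = ar[i % n]
--         tmp = list()
--         for j in range(x):
--             for k in range(n):
--                 if row[k] == "#": tmp.append("#")
--                 else: tmp.append(".")
--         br.append(tmp)
--     m = len(br)
--     br[m//2][m//2] = "S"
--     return br
-- ===== SOURCE B (Python) =====
-- def supergen(ar, x):
--     n = len(ar)
--     # widen each input row once: normalized cells, tiled x times horizontally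
--     wide = [['#' if row[k] == '#' else '.' for k in range(n)] * x for row in ar]
--     # stack x copies of the widened block vertically (fresh list per output row)
--     br = [list(r) for _ in range(x) for r in wide]
--     m = n * x
--     br[m // 2][m // 2] = "S"
--     return br
-- ===== Notes on version B (the rewrite author's own statement) =====
-- stated objective: alternative
-- what changed: B builds the widened n-row block once and stacks x vertical copies of it, eliminating A's per-output-row i%n modulo lookup and per-cell re-evaluation in a triple nested loop.
import Mathlib
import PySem

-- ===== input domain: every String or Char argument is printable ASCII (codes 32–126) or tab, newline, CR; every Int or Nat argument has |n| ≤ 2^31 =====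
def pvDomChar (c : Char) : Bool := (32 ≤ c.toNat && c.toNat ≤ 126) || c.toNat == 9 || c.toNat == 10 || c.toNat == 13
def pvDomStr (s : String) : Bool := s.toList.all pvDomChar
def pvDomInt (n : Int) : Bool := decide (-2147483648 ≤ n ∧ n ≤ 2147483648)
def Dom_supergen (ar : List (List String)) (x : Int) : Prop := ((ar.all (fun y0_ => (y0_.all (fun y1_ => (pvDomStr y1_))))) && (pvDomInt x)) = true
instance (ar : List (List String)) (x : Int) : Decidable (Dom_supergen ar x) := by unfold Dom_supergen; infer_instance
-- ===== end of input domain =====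

-- B widens each input row once (normalize + tile horizontally by list multiplication) and then
-- stacks x vertical copies of that block, eliminating A's per-output-row i%n modulo lookup and
-- per-cell re-evaluation; same output, different decomposition (alternative).

-- shared helper for the identical final statement 'br[m//2][m//2] = "S"' of both Pythons
-- (under Pre_ the index is in range; out of range Python raises, excluded by Pre_)
def pvSetS (br : List (List String)) (i : Nat) : List (List String) :=
  br.modify i (fun row => row.set i "S")

-- ===== PORT A =====
def supergen (ar : List (List String)) (x : Int) : List (List String) :=
  let n : Int := ar.length
  let br := (PySem.List.pyRange 0 (n * x) 1).foldl (fun br i =>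
    let row := PySem.List.pyGetD ar (PySem.Int.mod i n) []
    let tmp := (PySem.List.pyRange 0 x 1).foldl (fun tmp _ =>
      (PySem.List.pyRange 0 n 1).foldl (fun tmp k =>
        if PySem.List.pyGetD row k "" == "#" then tmp ++ ["#"] else tmp ++ ["."]) tmp) []
    br ++ [tmp]) []
  let m : Int := br.length
  pvSetS br (PySem.Int.floordiv m 2).toNat

-- ===== PORT B =====
def supergen_alt (ar : List (List String)) (x : Int) : List (List String) :=
  let n : Int := ar.length
  -- wide = [['#' if row[k]=='#' else '.' for k in range(n)] * x for row in ar]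
  let wide := ar.map (fun row =>
    PySem.List.pyRepeat ((PySem.List.pyRange 0 n 1).map (fun k =>
      if PySem.List.pyGetD row k "" == "#" then "#" else ".")) x)
  -- br = [list(r) for _ in range(x) for r in wide]   (list(r) copies; identity on values)
  let br := (PySem.List.pyRange 0 x 1).flatMap (fun _ => wide.map (fun r => r))
  let m : Int := n * x
  pvSetS br (PySem.Int.floordiv m 2).toNat

-- ===== PRECONDITION & SPEC =====
-- Pre_ excludes exactly the inputs where A raises: empty grid or x < 1 (IndexError at br[0]),
-- and any row shorter than the grid height (IndexError at row[k]).
def Pre_supergen (ar : List (List String)) (x : Int) : Prop :=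
  ar ≠ [] ∧ 1 ≤ x ∧ ∀ row ∈ ar, ar.length ≤ row.length
instance (ar : List (List String)) (x : Int) : Decidable (Pre_supergen ar x) := by unfold Pre_supergen; infer_instance

def pvWitness_supergen : List (List String) × Int := ([["#", "."], [".", "."]], 1)

def Spec_supergen (ar : List (List String)) (x : Int) (out : List (List String)) : Prop := out = supergen_alt ar x
instance (ar : List (List String)) (x : Int) (out : List (List String)) : Decidable (Spec_supergen ar x out) := by unfold Spec_supergen; infer_instance

-- ===== CLAIM (what is proved, stated in full; the proofs are below) =====
def Claim_equal_supergen : Prop := ∀ (ar : List (List String)) (x : Int), Dom_supergen ar x → Pre_supergen ar x → Spec_supergen ar x (supergen ar x)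

-- ===== LEMMAS AND PROOFS =====

-- repeated constant append = flatten of replicate
theorem foldl_append_const {α β : Type} (L : List α) (xs : List β) (acc : List α) :
    xs.foldl (fun a _ => a ++ L) acc = acc ++ (List.replicate xs.length L).flatten := by
  induction xs generalizing acc with
  | nil => simp
  | cons y ys ih => simp [List.foldl, ih, List.replicate_succ, List.append_assoc]

-- constant flatMap = flatten of replicate
theorem flatMap_const {α β : Type} (xs : List β) (w : List α) :
    xs.flatMap (fun _ => w) = (List.replicate xs.length w).flatten := by
  induction xs with
  | nil => simp
  | cons y ys ih => simp [List.flatMap_cons, ih, List.replicate_succ]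

-- A's innermost k-loop builds exactly the normalized row appended to the accumulator
theorem inner_fold_eq (row : List String) (n : Int) (tmp : List String) :
    (PySem.List.pyRange 0 n 1).foldl (fun tmp k =>
        if PySem.List.pyGetD row k "" == "#" then tmp ++ ["#"] else tmp ++ ["."]) tmp
    = tmp ++ (PySem.List.pyRange 0 n 1).map (fun k =>
        if PySem.List.pyGetD row k "" == "#" then "#" else ".") := by
  have h : (fun (t : List String) (k : Int) =>
      if PySem.List.pyGetD row k "" == "#" then t ++ ["#"] else t ++ ["."])
      = fun t k => t ++ [if PySem.List.pyGetD row k "" == "#" then "#" else "."] := by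
    funext t k; split <;> rfl
  rw [h, PySem.List.foldl_append_singleton_eq_map]

-- one output row of A equals the horizontally tiled normalized row it reads
theorem row_eq (ar : List (List String)) (x i : Int)
    (hn0 : (0:Int) < ar.length) :
    (PySem.List.pyRange 0 x 1).foldl (fun tmp _ =>
      (PySem.List.pyRange 0 (ar.length : Int) 1).foldl (fun tmp k =>
        if PySem.List.pyGetD (PySem.List.pyGetD ar (PySem.Int.mod i (ar.length : Int)) []) k "" == "#"
        then tmp ++ ["#"] else tmp ++ ["."]) tmp) []
    = (List.replicate x.toNat (PySem.List.pyGetD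
        (ar.map (fun row => (PySem.List.pyRange 0 (ar.length : Int) 1).map (fun k =>
          if PySem.List.pyGetD row k "" == "#" then "#" else ".")))
        (PySem.Int.mod i (ar.length : Int)) [])).flatten := by
  have hj0 : 0 ≤ PySem.Int.mod i (ar.length : Int) := PySem.Int.mod_nonneg i hn0
  have hj1 : PySem.Int.mod i (ar.length : Int) < (ar.length : Int) := PySem.Int.mod_lt i hn0
  rw [PySem.List.pyGetD_eq_getElem ar [] hj0 hj1]
  rw [PySem.List.pyGetD_eq_getElem
    (ar.map (fun row => (PySem.List.pyRange 0 (ar.length : Int) 1).map (fun k =>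
      if PySem.List.pyGetD row k "" == "#" then "#" else "."))) [] hj0 (by simpa using hj1)]
  rw [List.getElem_map]
  have hin := inner_fold_eq (ar[(PySem.Int.mod i (ar.length : Int)).toNat]) (ar.length : Int)
  calc (PySem.List.pyRange 0 x 1).foldl (fun tmp _ =>
        (PySem.List.pyRange 0 (ar.length : Int) 1).foldl (fun tmp k =>
          if PySem.List.pyGetD (ar[(PySem.Int.mod i (ar.length : Int)).toNat]) k "" == "#"
          then tmp ++ ["#"] else tmp ++ ["."]) tmp) []
      = (PySem.List.pyRange 0 x 1).foldl (fun tmp _ =>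
          tmp ++ (PySem.List.pyRange 0 (ar.length : Int) 1).map (fun k =>
            if PySem.List.pyGetD (ar[(PySem.Int.mod i (ar.length : Int)).toNat]) k "" == "#"
            then "#" else ".")) [] := by
        congr 1; funext t _; exact hin t
    _ = (List.replicate x.toNat ((PySem.List.pyRange 0 (ar.length : Int) 1).map (fun k =>
          if PySem.List.pyGetD (ar[(PySem.Int.mod i (ar.length : Int)).toNat]) k "" == "#"
          then "#" else "."))).flatten := by
        rw [foldl_append_const]
        simp [PySem.List.length_pyRange_one]

-- mapping g(i % n) over range(0, n*c) = c stacked copies of mapping g over range(0, n)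
theorem tile_map {α : Type} (g : Int → α) (n : Int) (hn : 0 < n) (c : Nat) :
    (PySem.List.pyRange 0 (n * (c : Int)) 1).map (fun i => g (PySem.Int.mod i n))
      = (List.replicate c ((PySem.List.pyRange 0 n 1).map g)).flatten := by
  induction c with
  | zero => simp [PySem.List.pyRange_one_eq_nil]
  | succ c ih =>
    have hmul : n * ((c + 1 : Nat) : Int) = n * (c : Int) + n := by push_cast; ring
    have h1 : (0:Int) ≤ n * (c : Int) := by positivity
    rw [hmul, PySem.List.pyRange_one_append 0 (n * (c:Int)) (n * (c:Int) + n) h1 (by linarith),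
        List.map_append, ih, List.replicate_succ', List.flatten_append]
    congr 1
    rw [PySem.List.pyRange_one (n * (c:Int)) (n * (c:Int) + n), PySem.List.pyRange_one 0 n]
    have hd : (n * (c:Int) + n - n * (c:Int)).toNat = (n - 0).toNat := by omega
    rw [hd]
    simp only [List.map_map, List.flatten_cons, List.flatten_nil, List.append_nil]
    apply List.map_congr_left
    intro k hk
    have hk' : (k : Int) < n := by
      have := List.mem_range.mp hk; omega
    simp only [Function.comp]
    congr 1
    rw [PySem.Int.mod_eq_emod_of_pos hn]
    have : n * (c:Int) + (k:Int) = (k:Int) + n * (c:Int) := by ring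
    rw [this, Int.add_mul_emod_self_left, Int.emod_eq_of_lt (by positivity) hk']
    omega

-- ===== VERDICT (by name: the statement is the Claim_ definition above) =====
theorem supergen_spec : Claim_equal_supergen := by
  intro ar x _ hpre
  obtain ⟨hne, hx, -⟩ := hpre
  have hn0 : (0:Int) < ar.length := by
    have := List.length_pos_of_ne_nil hne; exact_mod_cast this
  unfold Spec_supergen
  simp only [supergen, supergen_alt]
  rw [PySem.List.foldl_append_singleton_eq_map, List.nil_append]
  -- name the normalized / widened tables
  set norm := ar.map (fun row => (PySem.List.pyRange 0 (ar.length : Int) 1).map (fun k =>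
    if PySem.List.pyGetD row k "" == "#" then "#" else ".")) with hnorm
  -- A's rows, rewritten via row_eq
  have hbr : (PySem.List.pyRange 0 ((ar.length : Int) * x) 1).map (fun i =>
        (PySem.List.pyRange 0 x 1).foldl (fun tmp _ =>
          (PySem.List.pyRange 0 (ar.length : Int) 1).foldl (fun tmp k =>
            if PySem.List.pyGetD (PySem.List.pyGetD ar (PySem.Int.mod i (ar.length : Int)) []) k "" == "#"
            then tmp ++ ["#"] else tmp ++ ["."]) tmp) [])
      = (PySem.List.pyRange 0 ((ar.length : Int) * x) 1).map (fun i =>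
          (List.replicate x.toNat (PySem.List.pyGetD norm (PySem.Int.mod i (ar.length : Int)) [])).flatten) := by
    apply List.map_congr_left
    intro i _
    exact row_eq ar x i hn0
  rw [hbr]
  have hxnat : ((x.toNat : Int)) = x := Int.toNat_of_nonneg (by linarith)
  -- A's rows = x stacked copies of the block (pyRange 0 n).map g
  have htile := tile_map (fun j => (List.replicate x.toNat (PySem.List.pyGetD norm j [])).flatten)
    (ar.length : Int) hn0 x.toNat
  rw [hxnat] at htile
  rw [htile]
  -- the block equals B's wide table
  have hlen_norm : (norm.length : Int) = (ar.length : Int) := by simp [hnorm]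
  have hblock : (PySem.List.pyRange 0 (ar.length : Int) 1).map
      (fun j => (List.replicate x.toNat (PySem.List.pyGetD norm j [])).flatten)
      = norm.map (fun r => (List.replicate x.toNat r).flatten) := by
    have hget : (PySem.List.pyRange 0 ((norm.length : Int)) 1).map
        (fun j => PySem.List.pyGetD norm j ([] : List String)) = norm :=
      PySem.List.map_pyGetD_pyRange_zero' norm []
    calc (PySem.List.pyRange 0 (ar.length : Int) 1).map
          (fun j => (List.replicate x.toNat (PySem.List.pyGetD norm j [])).flatten)
        = ((PySem.List.pyRange 0 ((norm.length : Int)) 1).map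
            (fun j => PySem.List.pyGetD norm j [])).map
            (fun r => (List.replicate x.toNat r).flatten) := by
          rw [List.map_map, hlen_norm]; rfl
      _ = norm.map (fun r => (List.replicate x.toNat r).flatten) := by rw [hget]
  rw [hblock]
  -- B's body: flatMap of constant wide = flatten of replicate
  have hB : (PySem.List.pyRange 0 x 1).flatMap (fun _ =>
        (ar.map (fun row => PySem.List.pyRepeat ((PySem.List.pyRange 0 (ar.length : Int) 1).map (fun k =>
          if PySem.List.pyGetD row k "" == "#" then "#" else ".")) x)).map (fun r => r))
      = (List.replicate x.toNat (norm.map (fun r => (List.replicate x.toNat r).flatten))).flatten := by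
    have hw : ((ar.map (fun row => PySem.List.pyRepeat ((PySem.List.pyRange 0 (ar.length : Int) 1).map (fun k =>
          if PySem.List.pyGetD row k "" == "#" then "#" else ".")) x)).map (fun r => r))
        = norm.map (fun r => (List.replicate x.toNat r).flatten) := by
      rw [List.map_id', hnorm, List.map_map]; rfl
    have hl : (PySem.List.pyRange 0 x 1).length = x.toNat := by
      simp [PySem.List.length_pyRange_one]
    rw [flatMap_const, hw, hl]
  rw [hB]
  -- the 'S' indices agree: A uses len(br)//2, B uses (n*x)//2
  congr 2
  have : (((List.replicate x.toNat (norm.map (fun r => (List.replicate x.toNat r).flatten))).flatten).length : Int)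
      = (ar.length : Int) * x := by
    simp [List.length_flatten, hnorm]
    rw [max_eq_left (by linarith : (0:Int) ≤ x)]
    ring
  rw [this]
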